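-- pv_equiv track=rewrite | github.com/Fabianstw/Algorithm-and-Data-Structures | Network/MaxFlow.py | backtrack_path
-- ===== SOURCE A (Python) =====
-- def backtrack_path(visited, s, t):
--     s -= 1
--     t -= 1
--     path = []
--     bottleneck = visited[t][1]
--     while True:
--         # find the path from s to t in visited
--         path.append(t)
--         if t == s:
--             break
--         t = visited[t][0]
--         if visited[t][1] < bottleneck:
--             bottleneck = visited[t][1]
--     return path[::-1], bottleneck
-- ===== SOURCE B (Python) =====
-- def backtrack_path(visited, s, t):
--     s -= 1
--
--     def walk(node):
--         # (path from s up to node in forward order, minimum capacity on it)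
--         cap = visited[node][1]
--         if node == s:
--             return [node], cap
--         path, b = walk(visited[node][0])
--         path.append(node)
--         return path, b if b < cap else cap
--
--     return walk(t - 1)
-- ===== Notes on version B (the rewrite author's own statement) =====
-- stated objective: simpler
-- what changed: A's iterative while-True loop that appends nodes, breaks on s, keeps a running break-before-compare minimum and finally reverses the path is replaced by a recursion on the parent chain that builds the path in forward order while unwinding (no reversal, no mutable accumulators) and combines the minimum capacity on return.
import Mathlib
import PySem

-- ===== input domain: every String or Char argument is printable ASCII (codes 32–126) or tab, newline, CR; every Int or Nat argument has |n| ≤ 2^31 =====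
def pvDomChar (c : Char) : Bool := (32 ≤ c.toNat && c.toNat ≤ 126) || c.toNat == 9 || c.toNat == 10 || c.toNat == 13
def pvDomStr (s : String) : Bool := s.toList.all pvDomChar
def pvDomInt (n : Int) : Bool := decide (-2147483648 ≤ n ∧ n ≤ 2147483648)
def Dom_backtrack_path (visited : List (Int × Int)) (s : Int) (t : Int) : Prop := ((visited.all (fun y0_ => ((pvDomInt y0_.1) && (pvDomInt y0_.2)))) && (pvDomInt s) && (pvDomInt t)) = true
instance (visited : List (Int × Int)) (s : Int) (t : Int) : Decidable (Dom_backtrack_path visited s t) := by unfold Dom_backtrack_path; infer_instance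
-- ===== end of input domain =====

-- B replaces A's iterative loop (append + break-on-s + running minimum + final reversal)
-- by a recursion on the parent chain that builds the path forward while unwinding and
-- combines the minimum on return (objective: simpler).


-- ===== PORT A =====
-- A's "while True" loop: append t; break when t == s; step to the parent and fold the
-- running minimum.  Fuel 2*|visited|+1 bounds the iteration count on every input
-- admitted by Pre_ (the fuel-0 branch is unreachable there).
def btA_loop (v : List (Int × Int)) (s : Int) : Nat → Int → List Int → Int → List Int × Int
  | 0, _, path, b => (path, b)
  | fuel+1, t, path, b =>
      let path := path ++ [t]
      if t = s then (path, b)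
      else
        let t' := ((PySem.List.pyGet? v t).getD (0, 0)).1
        let c := ((PySem.List.pyGet? v t').getD (0, 0)).2
        let b' := if c < b then c else b
        btA_loop v s fuel t' path b'

def backtrack_path (visited : List (Int × Int)) (s : Int) (t : Int) : List Int × Int :=
  let s := s - 1
  let t := t - 1
  let bottleneck := ((PySem.List.pyGet? visited t).getD (0, 0)).2
  let r := btA_loop visited s (2 * visited.length + 1) t [] bottleneck
  (r.1.reverse, r.2)

-- ===== PORT B =====
-- Source B's recursive walk: at s return ([s], cap); otherwise recurse on the parent,
-- append the node during unwinding and combine the minimum on return.  Same fuel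
-- bound, whose base case is unreachable under Pre_.
def btWalk (v : List (Int × Int)) (s : Int) : Nat → Int → List Int × Int
  | 0, node => ([node], ((PySem.List.pyGet? v node).getD (0, 0)).2)
  | fuel+1, node =>
      let cap := ((PySem.List.pyGet? v node).getD (0, 0)).2
      if node = s then ([node], cap)
      else
        let r := btWalk v s fuel ((PySem.List.pyGet? v node).getD (0, 0)).1
        (r.1 ++ [node], if r.2 < cap then r.2 else cap)

def backtrack_path_alt (visited : List (Int × Int)) (s : Int) (t : Int) : List Int × Int :=
  let s := s - 1
  btWalk visited s (2 * visited.length + 1) (t - 1)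

-- ===== PRECONDITION & SPEC =====
-- Following parent pointers from a node: none as soon as an index is not a valid
-- Python index of visited.
def btIter (v : List (Int × Int)) : Nat → Int → Option Int
  | 0, n => some n
  | k+1, n => (PySem.List.pyGet? v n).bind (fun p => btIter v k p.1)

-- Pre_ is exactly A's return domain: A returns iff the parent chain from t-1 reaches
-- s-1 through valid (possibly negative) Python indices and s-1 itself is a valid index
-- (A reads visited[s-1][1] before breaking); reaching within 2*|visited| steps is exact,
-- since a longer prefix repeats a node value and A then loops forever (and out-of-range
-- chains make A raise IndexError).
def Pre_backtrack_path (visited : List (Int × Int)) (s : Int) (t : Int) : Prop :=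
  (∃ k ≤ 2 * visited.length, btIter visited k (t - 1) = some (s - 1)) ∧
  (PySem.List.pyGet? visited (s - 1)).isSome = true
instance (visited : List (Int × Int)) (s : Int) (t : Int) : Decidable (Pre_backtrack_path visited s t) := by unfold Pre_backtrack_path; infer_instance

def pvWitness_backtrack_path : (List (Int × Int)) × Int × Int := ([(0, 7), (0, 3)], 1, 2)

def Spec_backtrack_path (visited : List (Int × Int)) (s : Int) (t : Int) (out : List Int × Int) : Prop := out = backtrack_path_alt visited s t
instance (visited : List (Int × Int)) (s : Int) (t : Int) (out : List Int × Int) : Decidable (Spec_backtrack_path visited s t out) := by unfold Spec_backtrack_path; infer_instance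

-- ===== CLAIM (what is proved, stated in full; the proofs are below) =====
def Claim_equal_backtrack_path : Prop := ∀ (visited : List (Int × Int)) (s : Int) (t : Int), Dom_backtrack_path visited s t → Pre_backtrack_path visited s t → Spec_backtrack_path visited s t (backtrack_path visited s t)

-- ===== LEMMAS AND PROOFS =====

-- The parent chain from `node` down to the first occurrence of s, as a reference list.
def btChain (v : List (Int × Int)) (s : Int) : Nat → Int → List Int
  | 0, node => [node]
  | fuel+1, node =>
      if node = s then [node]
      else node :: btChain v s fuel (((PySem.List.pyGet? v node).getD (0, 0)).1)

theorem btChain_head (v : List (Int × Int)) (s : Int) (fuel : Nat) (node : Int) :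
    btChain v s fuel node = node :: (btChain v s fuel node).tail := by
  cases fuel with
  | zero => rfl
  | succ f => simp only [btChain]; split <;> rfl

theorem bt_if_eq_min (a b : Int) : (if a < b then a else b) = min a b := by
  rcases lt_or_ge a b with h | h
  · rw [if_pos h, min_eq_left (le_of_lt h)]
  · rw [if_neg (not_lt.mpr h), min_eq_right h]

theorem min_foldl_comm (l : List Int) : ∀ a b : Int,
    List.foldl min (min a b) l = min a (List.foldl min b l) := by
  induction l with
  | nil => intro a b; rfl
  | cons c cs ih =>
      intro a b
      simp only [List.foldl]
      rw [min_assoc, ih]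

theorem foldl_if_eq_min (b : Int) (l : List Int) :
    List.foldl (fun a c => if c < a then c else a) b l = List.foldl min b l := by
  induction l generalizing b with
  | nil => rfl
  | cons x xs ih =>
      simp only [List.foldl]
      rw [ih]
      congr 1
      rw [bt_if_eq_min, min_comm]

-- B's recursion computes the reversed chain and the foldl-min of its capacities.
theorem btWalk_eq (v : List (Int × Int)) (σ : Int) : ∀ (fuel : Nat) (node : Int),
    btWalk v σ fuel node = ((btChain v σ fuel node).reverse,
      List.foldl min (((PySem.List.pyGet? v node).getD (0, 0)).2)
        ((btChain v σ fuel node).tail.map (fun n => ((PySem.List.pyGet? v n).getD (0, 0)).2))) := by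
  intro fuel
  induction fuel with
  | zero => intro node; simp [btWalk, btChain]
  | succ f ih =>
      intro node
      simp only [btWalk, btChain]
      split
      · simp
      · rw [ih]
        refine Prod.ext (by simp) ?_
        simp only [List.tail_cons]
        rw [btChain_head v σ f, List.map_cons, List.foldl_cons, min_foldl_comm,
          bt_if_eq_min, min_comm]
        rw [← btChain_head]

-- A's loop computes the chain (appended to the accumulator) and the break-before-compare
-- fold of the tail capacities, provided the chain reaches σ within the fuel.
theorem btA_loop_eq (v : List (Int × Int)) (σ : Int) : ∀ (k fuel : Nat) (node : Int)
    (acc : List Int) (b : Int), k < fuel → btIter v k node = some σ →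
    btA_loop v σ fuel node acc b = (acc ++ btChain v σ fuel node,
      List.foldl (fun a c => if c < a then c else a) b
        ((btChain v σ fuel node).tail.map (fun n => ((PySem.List.pyGet? v n).getD (0, 0)).2))) := by
  intro k
  induction k with
  | zero =>
      intro fuel node acc b hk hit
      simp only [btIter, Option.some.injEq] at hit
      subst hit
      cases fuel with
      | zero => omega
      | succ f => simp [btA_loop, btChain]
  | succ k ih =>
      intro fuel node acc b hk hit
      cases fuel with
      | zero => omega
      | succ f =>
          by_cases hns : node = σ
          · subst hns
            simp [btA_loop, btChain]
          · simp only [btIter] at hit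
            cases hg : PySem.List.pyGet? v node with
            | none => rw [hg] at hit; simp at hit
            | some p =>
                rw [hg] at hit
                simp only [Option.bind_some] at hit
                have hrec := ih f p.1 (acc ++ [node])
                  (if ((PySem.List.pyGet? v p.1).getD (0, 0)).2 < b
                   then ((PySem.List.pyGet? v p.1).getD (0, 0)).2 else b)
                  (by omega) hit
                simp only [btA_loop, btChain, if_neg hns, hg, Option.getD_some]
                rw [hrec]
                rw [btChain_head v σ f p.1]
                simp

-- ===== VERDICT (by name: the statement is the Claim_ definition above) =====
theorem backtrack_path_spec : Claim_equal_backtrack_path := by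
  intro visited s t _ hpre
  obtain ⟨⟨k, hk, hit⟩, _⟩ := hpre
  unfold Spec_backtrack_path backtrack_path backtrack_path_alt
  dsimp only
  rw [btA_loop_eq visited (s - 1) k (2 * visited.length + 1) (t - 1) []
        (((PySem.List.pyGet? visited (t - 1)).getD (0, 0)).2) (by omega) hit,
      btWalk_eq]
  simp only [List.nil_append]
  rw [foldl_if_eq_min]
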